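-- pv_equiv track=rewrite | github.com/percy-raskova/pw-mcp | src/pw_mcp/ingest/chunker/line_mapping.py | _build_char_to_line_map
-- ===== SOURCE A (Python) =====
-- def _build_char_to_line_map(lines: list[str]) -> list[tuple[int, int, int]]:
--     """Build mapping of (char_start, char_end, line_index) for each line.
--
--     Used to map character positions in joined text back to original line numbers.
--
--     Args:
--         lines: List of original lines
--
--     Returns:
--         List of tuples (char_start, char_end, line_index) where positions
--         are relative to the joined text with newlines.
--     """
--     mapping: list[tuple[int, int, int]] = []
--     char_pos = 0
--     for line_idx, line in enumerate(lines):
--         line_start = char_pos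
--         line_end = char_pos + len(line)
--         mapping.append((line_start, line_end, line_idx))
--         char_pos = line_end + 1  # +1 for the newline character
--     return mapping
-- ===== SOURCE B (Python) =====
-- def _build_char_to_line_map(lines: list[str]) -> list[tuple[int, int, int]]:
--     """Back-to-front: start from the total joined length and walk the lines
--     from the last to the first, subtracting len(line)+1 each step."""
--     total = sum(len(line) + 1 for line in lines)
--     mapping: list[tuple[int, int, int]] = []
--     pos = total
--     for line_idx in range(len(lines) - 1, -1, -1):
--         line = lines[line_idx]
--         pos -= len(line) + 1
--         mapping.append((pos, pos + len(line), line_idx))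
--     mapping.reverse()
--     return mapping
-- ===== Notes on version B (the rewrite author's own statement) =====
-- stated objective: alternative
-- what changed: Builds the mapping back-to-front: it first computes the total joined length, then iterates the lines in reverse order subtracting len(line)+1 from a position counter and finally reverses the collected list, instead of A's forward loop threading a running char_pos upward.
import Mathlib
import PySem

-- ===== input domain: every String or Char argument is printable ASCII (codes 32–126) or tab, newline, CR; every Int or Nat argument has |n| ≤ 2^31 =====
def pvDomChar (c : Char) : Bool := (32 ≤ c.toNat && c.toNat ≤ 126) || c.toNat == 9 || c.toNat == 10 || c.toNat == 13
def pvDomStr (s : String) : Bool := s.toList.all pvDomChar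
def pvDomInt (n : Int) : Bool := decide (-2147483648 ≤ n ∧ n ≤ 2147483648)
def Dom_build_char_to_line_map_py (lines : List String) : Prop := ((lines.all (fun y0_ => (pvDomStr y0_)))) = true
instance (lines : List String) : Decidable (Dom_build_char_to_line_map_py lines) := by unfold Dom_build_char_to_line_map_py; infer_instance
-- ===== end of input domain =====

-- B builds the mapping back-to-front from the total joined length (same O(n) cost); return values agree on all inputs.

-- ===== PORT A =====
-- A: one forward loop over enumerate(lines) threading char_pos upward, appending (start, end, idx).
def aLoop (lines : List String) (idx : Int) (char_pos : Int) : List (Int × Int × Int) :=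
  match lines with
  | [] => []
  | line :: rest =>
      (char_pos, char_pos + (PySem.Str.len line : Int), idx)
        :: aLoop rest (idx + 1) (char_pos + (PySem.Str.len line : Int) + 1)

def build_char_to_line_map_py (lines : List String) : List (Int × Int × Int) :=
  aLoop lines 0 0

-- ===== PORT B =====
-- B step 1: total = sum(len(line) + 1 for line in lines)
def bTotal (lines : List String) : Int :=
  lines.foldl (fun acc line => acc + (PySem.Str.len line : Int) + 1) 0

-- B step 2: the loop over range(len(lines)-1, -1, -1), i.e. the lines in reverse
-- order with a descending index, subtracting len(line)+1 from pos each step.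
def bLoop (revLines : List String) (i : Int) (pos : Int) : List (Int × Int × Int) :=
  match revLines with
  | [] => []
  | line :: rest =>
      let pos' := pos - ((PySem.Str.len line : Int) + 1)
      (pos', pos' + (PySem.Str.len line : Int), i) :: bLoop rest (i - 1) pos'

-- B step 3: mapping.reverse()
def build_char_to_line_map_py_alt (lines : List String) : List (Int × Int × Int) :=
  (bLoop lines.reverse ((lines.length : Int) - 1) (bTotal lines)).reverse

-- ===== PRECONDITION & SPEC =====
def Spec_build_char_to_line_map_py (lines : List String) (out : List (Int × Int × Int)) : Prop := out = build_char_to_line_map_py_alt lines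
instance (lines : List String) (out : List (Int × Int × Int)) : Decidable (Spec_build_char_to_line_map_py lines out) := by unfold Spec_build_char_to_line_map_py; infer_instance

-- ===== CLAIM (what is proved, stated in full; the proofs are below) =====
def Claim_equal_build_char_to_line_map_py : Prop := ∀ (lines : List String), Dom_build_char_to_line_map_py lines → Spec_build_char_to_line_map_py lines (build_char_to_line_map_py lines)

-- ===== LEMMAS AND PROOFS =====
theorem bTotal_shift (xs : List String) :
    ∀ (c : Int), xs.foldl (fun acc line => acc + (PySem.Str.len line : Int) + 1) c = c + bTotal xs := by
  induction xs with
  | nil => intro c; simp [bTotal]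
  | cons x xs ih =>
      intro c
      show xs.foldl (fun acc line => acc + (PySem.Str.len line : Int) + 1)
        (c + (PySem.Str.len x : Int) + 1) = c + bTotal (x :: xs)
      rw [ih]
      have h : bTotal (x :: xs) = ((PySem.Str.len x : Int) + 1) + bTotal xs := by
        show xs.foldl (fun acc line => acc + (PySem.Str.len line : Int) + 1)
          (0 + (PySem.Str.len x : Int) + 1) = _
        rw [ih]; ring
      rw [h]; ring

theorem bTotal_cons (x : String) (xs : List String) :
    bTotal (x :: xs) = (PySem.Str.len x : Int) + 1 + bTotal xs := by
  show xs.foldl (fun acc line => acc + (PySem.Str.len line : Int) + 1)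
    (0 + (PySem.Str.len x : Int) + 1) = _
  rw [bTotal_shift]; ring

theorem bTotal_snoc (xs : List String) (x : String) :
    bTotal (xs ++ [x]) = bTotal xs + (PySem.Str.len x : Int) + 1 := by
  show (xs ++ [x]).foldl (fun acc line => acc + (PySem.Str.len line : Int) + 1) 0 = _
  rw [List.foldl_append]
  rfl

theorem aLoop_snoc (xs : List String) (x : String) :
    ∀ (idx t : Int), aLoop (xs ++ [x]) idx t
      = aLoop xs idx t ++ [(t + bTotal xs, t + bTotal xs + (PySem.Str.len x : Int), idx + (xs.length : Int))] := by
  induction xs with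
  | nil => intro idx t; simp [aLoop, bTotal]
  | cons y ys ih =>
      intro idx t
      simp only [List.cons_append, aLoop]
      rw [ih]
      have h : ((t + (PySem.Str.len y : Int) + 1) + bTotal ys,
                (t + (PySem.Str.len y : Int) + 1) + bTotal ys + (PySem.Str.len x : Int),
                (idx + 1) + (ys.length : Int))
             = (t + bTotal (y :: ys), t + bTotal (y :: ys) + (PySem.Str.len x : Int),
                idx + (((y :: ys).length : Nat) : Int)) := by
        rw [bTotal_cons]
        simp only [List.length_cons, Prod.mk.injEq]
        refine ⟨by ring, by ring, by push_cast; ring⟩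
      rw [h]

theorem bLoop_eq_aLoop (lines : List String) :
    (bLoop lines.reverse ((lines.length : Int) - 1) (bTotal lines)).reverse = aLoop lines 0 0 := by
  induction lines using List.reverseRecOn with
  | nil => rfl
  | append_singleton xs x ih =>
      rw [List.reverse_append, List.reverse_singleton, List.singleton_append, bTotal_snoc]
      simp only [bLoop]
      have h1 : bTotal xs + (PySem.Str.len x : Int) + 1 - ((PySem.Str.len x : Int) + 1)
          = bTotal xs := by ring
      have h2 : (((xs ++ [x]).length : Nat) : Int) - 1 - 1 = (xs.length : Int) - 1 := by
        simp
      have h3 : (((xs ++ [x]).length : Nat) : Int) - 1 = (xs.length : Int) := by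
        simp
      rw [h1, h2, h3, List.reverse_cons, ih, aLoop_snoc]
      simp

-- ===== VERDICT (by name: the statement is the Claim_ definition above) =====
theorem build_char_to_line_map_py_spec : Claim_equal_build_char_to_line_map_py := by
  intro lines _
  unfold Spec_build_char_to_line_map_py build_char_to_line_map_py build_char_to_line_map_py_alt
  exact (bLoop_eq_aLoop lines).symm
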